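-- pv_equiv track=rewrite | github.com/K1XE/LeetCode | 周赛/451/no1.py | minCuttingCost
-- ===== SOURCE A (Python) =====
-- def minCuttingCost(n: int, m: int, k: int) -> int:
--     if n <= k and m <= k: return 0
--     c = 0
--     minv = float('inf')
--     if n > k:
--         for i in range(1, k + 1):
--             x1 = i
--             x2 = n - i
--             if x2 > k: continue
--             minv = min(minv, x1 * x2)
--         c += minv
--     minv = float('inf')
--     if m > k:
--         for i in range(1, k + 1):
--             x1 = i
--             x2 = m - i
--             if x2 > k: continue
--             minv = min(minv, x1 * x2)
--         c += minv
--     return c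
-- ===== SOURCE B (Python) =====
-- def minCuttingCost(n: int, m: int, k: int) -> int:
--     # Closed form: a side of length L needs a cut iff L > k; the cheapest cut
--     # i*(L-i) with both pieces <= k is k*(L-k), and it exists iff L <= 2*k
--     # (otherwise no single cut works: the minimum over the empty set is inf).
--     c = 0
--     if n > k:
--         c += k * (n - k) if n <= 2 * k else float('inf')
--     if m > k:
--         c += k * (m - k) if m <= 2 * k else float('inf')
--     return c
-- ===== Notes on version B (the rewrite author's own statement) =====
-- stated objective: faster
-- what changed: Replaced the two O(k) minimum-searching loops over all cut positions by the closed form k*(L-k) per over-long side, proved to be the loop's minimum.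
-- outside the precondition, e.g. on minCuttingCost(10, 1, 2): A returns inf, B returns inf; on minCuttingCost(3, 3, 0): A returns inf, B returns inf
import Mathlib
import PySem

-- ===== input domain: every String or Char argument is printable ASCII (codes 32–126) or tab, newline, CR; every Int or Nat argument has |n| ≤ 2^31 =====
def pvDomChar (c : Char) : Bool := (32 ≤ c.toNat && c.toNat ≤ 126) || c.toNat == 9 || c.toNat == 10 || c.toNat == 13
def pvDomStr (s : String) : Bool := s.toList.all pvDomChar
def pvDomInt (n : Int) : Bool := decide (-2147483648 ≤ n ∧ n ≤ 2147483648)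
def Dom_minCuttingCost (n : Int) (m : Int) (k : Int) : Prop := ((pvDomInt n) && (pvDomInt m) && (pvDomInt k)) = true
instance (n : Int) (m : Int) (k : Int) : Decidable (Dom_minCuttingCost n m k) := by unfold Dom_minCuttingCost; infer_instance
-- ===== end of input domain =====

-- B replaces A's two O(k) cut-search loops by the closed form k*(L-k) per over-long side (faster, asymptotic).

-- ===== PORT A =====
-- A's loop: minv starts as float('inf') (modelled as `none`), and takes the min of i*(L-i)
-- over cut positions i in range(1, k+1) whose other piece L-i is within k.
def pvStep (L k : Int) (acc : Option Int) (i : Int) : Option Int :=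
  let x1 := i
  let x2 := L - i
  if x2 > k then acc
  else some (match acc with | none => x1 * x2 | some v => min v (x1 * x2))

def pvLoopMin (L k : Int) : Option Int :=
  (PySem.List.pyRange 1 (k + 1) 1).foldl (pvStep L k) none

def minCuttingCost (n : Int) (m : Int) (k : Int) : Int :=
  if n ≤ k ∧ m ≤ k then 0
  else
    let c : Int := 0
    -- `c += minv`: on Pre_ the loop always found a cut, so minv = some _; `none` would be
    -- Python's float inf, which Pre_ excludes.
    let c := if n > k then c + (pvLoopMin n k).getD 0 else c
    let c := if m > k then c + (pvLoopMin m k).getD 0 else c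
    c

-- ===== PORT B =====
-- Source B adds float('inf') for a side with L > 2*k (no single cut works); as in port A,
-- inf is modelled as `none` (those inputs are outside Pre_).
def minCuttingCost_alt (n : Int) (m : Int) (k : Int) : Int :=
  let c : Int := 0
  let c := if n > k then c + (if n ≤ 2 * k then some (k * (n - k)) else none).getD 0 else c
  let c := if m > k then c + (if m ≤ 2 * k then some (k * (m - k)) else none).getD 0 else c
  c

-- ===== PRECONDITION & SPEC =====
-- Pre_ excludes inputs where a side needing a cut cannot be split into pieces ≤ k
-- (L > 2*k): there A adds float('inf') and returns a float, not an int.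
def Pre_minCuttingCost (n : Int) (m : Int) (k : Int) : Prop :=
  (n > k → n ≤ 2 * k) ∧ (m > k → m ≤ 2 * k)
instance (n : Int) (m : Int) (k : Int) : Decidable (Pre_minCuttingCost n m k) := by
  unfold Pre_minCuttingCost; infer_instance

def pvWitness_minCuttingCost : Int × Int × Int := (5, 6, 4)

def Spec_minCuttingCost (n : Int) (m : Int) (k : Int) (out : Int) : Prop := out = minCuttingCost_alt n m k
instance (n : Int) (m : Int) (k : Int) (out : Int) : Decidable (Spec_minCuttingCost n m k out) := by unfold Spec_minCuttingCost; infer_instance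

-- ===== CLAIM (what is proved, stated in full; the proofs are below) =====
def Claim_equal_minCuttingCost : Prop := ∀ (n : Int) (m : Int) (k : Int), Dom_minCuttingCost n m k → Pre_minCuttingCost n m k → Spec_minCuttingCost n m k (minCuttingCost n m k)

-- ===== LEMMAS AND PROOFS =====

-- The fold computes exactly B once (i) every valid cut in the remaining list costs ≥ B,
-- (ii) the accumulator is ≥ B, and (iii) B is hit either in the list or already in acc.
theorem pvFold_eq (L k B : Int) :
    ∀ (l : List Int) (acc : Option Int),
      (∀ i ∈ l, L - i ≤ k → B ≤ i * (L - i)) →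
      (∀ v, acc = some v → B ≤ v) →
      ((∃ i ∈ l, L - i ≤ k ∧ i * (L - i) = B) ∨ acc = some B) →
      l.foldl (pvStep L k) acc = some B := by
  intro l
  induction l with
  | nil =>
      intro acc _ hacc hhit
      rcases hhit with ⟨i, hi, _⟩ | h
      · exact absurd hi (List.not_mem_nil)
      · simpa using h
  | cons i t ih =>
      intro acc hall hacc hhit
      simp only [List.foldl_cons]
      apply ih
      · intro j hj hvj; exact hall j (List.mem_cons_of_mem _ hj) hvj
      · intro v hv
        unfold pvStep at hv
        simp only at hv
        split at hv
        · exact hacc v hv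
        · rename_i hvalid
          cases acc with
          | none =>
              simp only [Option.some.injEq] at hv
              have := hall i (List.mem_cons_self) (by omega)
              omega
          | some w =>
              simp only [Option.some.injEq] at hv
              have h1 := hall i (List.mem_cons_self) (by omega)
              have h2 := hacc w rfl
              subst hv
              exact le_min h2 h1
      · rcases hhit with ⟨j, hj, hvj, hej⟩ | h
        · rcases List.mem_cons.mp hj with rfl | hjt
          · -- hit at the head: the new acc is some B
            right
            unfold pvStep
            simp only
            rw [if_neg (by omega)]
            cases acc with
            | none => simpa using hej
            | some w =>
                have h2 := hacc w rfl
                simp only [Option.some.injEq]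
                rw [hej]; omega
          · left; exact ⟨j, hjt, hvj, hej⟩
        · -- acc is already some B; the step keeps it
          right
          subst h
          unfold pvStep
          simp only
          split
          · rfl
          · rename_i hvalid
            have h1 := hall i (List.mem_cons_self) (by omega)
            simp only [Option.some.injEq]
            omega

-- On Pre_, the loop's minimum over valid cuts of a side L with k < L ≤ 2*k is k*(L-k).
theorem pvLoopMin_eq (L k : Int) (h1 : k < L) (h2 : L ≤ 2 * k) :
    pvLoopMin L k = some (k * (L - k)) := by
  unfold pvLoopMin
  apply pvFold_eq
  · intro i hi hv
    rw [PySem.List.mem_pyRange_one] at hi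
    nlinarith [mul_nonneg (sub_nonneg.mpr (by omega : i ≤ k)) (sub_nonneg.mpr (by omega : (L - k) ≤ i))]
  · intro v hv; simp at hv
  · left
    refine ⟨k, ?_, by omega, rfl⟩
    rw [PySem.List.mem_pyRange_one]; omega

-- ===== VERDICT (by name: the statement is the Claim_ definition above) =====
theorem minCuttingCost_spec : Claim_equal_minCuttingCost := by
  intro n m k _ hpre
  unfold Spec_minCuttingCost minCuttingCost minCuttingCost_alt
  obtain ⟨hn, hm⟩ := hpre
  by_cases h1 : n ≤ k ∧ m ≤ k
  · rw [if_pos h1]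
    simp only [if_neg (show ¬ n > k by omega), if_neg (show ¬ m > k by omega)]
  · rw [if_neg h1]
    by_cases h2 : n > k
    · rw [pvLoopMin_eq n k h2 (hn h2)]
      by_cases h3 : m > k
      · rw [pvLoopMin_eq m k h3 (hm h3)]
        simp [h2, h3, if_pos (hn h2), if_pos (hm h3)]
      · simp [h2, h3, if_pos (hn h2)]
    · by_cases h3 : m > k
      · rw [pvLoopMin_eq m k h3 (hm h3)]
        simp [h2, h3, if_pos (hm h3)]
      · exact absurd ⟨by omega, by omega⟩ h1
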